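-- pv_equiv track=rewrite | github.com/sammymuench/HS_football_study | Maxpreps.py | assign_pos
-- ===== SOURCE A (Python) =====
-- def assign_pos(jersey_pos, num, poss_positions):
--     '''
--     Assigns player to position in dataframe
--     Inputs: array of positions, number position, offense or defense
--     Outputs: position to add
--     '''
--     counter = 0
--     for item in jersey_pos:
--         if item in poss_positions:
--             counter+=1
--             if counter == num:
--                 return item
--
--     return "--"
-- ===== SOURCE B (Python) =====
-- def _find_first(lst, allowed):
--     """First element of lst in allowed, together with the remainder after it; None if absent."""
--     for j, item in enumerate(lst):
--         if item in allowed: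
--             return item, lst[j + 1:]
--     return None
--
-- def assign_pos(jersey_pos, num, poss_positions):
--     allowed = set(poss_positions)
--     lst, k = jersey_pos, num
--     while k >= 1:
--         found = _find_first(lst, allowed)
--         if found is None:
--             return "--"
--         item, lst = found
--         if k == 1:
--             return item
--         k -= 1
--     return "--"
-- ===== Notes on version B (the rewrite author's own statement) =====
-- stated objective: alternative
-- what changed: Replaces A's single counter-accumulating filter pass with a set of allowed positions built once and a count-down on num that repeatedly finds the first allowed element and discards the prefix through it, returning when the count reaches 1.
import Mathlib
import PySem

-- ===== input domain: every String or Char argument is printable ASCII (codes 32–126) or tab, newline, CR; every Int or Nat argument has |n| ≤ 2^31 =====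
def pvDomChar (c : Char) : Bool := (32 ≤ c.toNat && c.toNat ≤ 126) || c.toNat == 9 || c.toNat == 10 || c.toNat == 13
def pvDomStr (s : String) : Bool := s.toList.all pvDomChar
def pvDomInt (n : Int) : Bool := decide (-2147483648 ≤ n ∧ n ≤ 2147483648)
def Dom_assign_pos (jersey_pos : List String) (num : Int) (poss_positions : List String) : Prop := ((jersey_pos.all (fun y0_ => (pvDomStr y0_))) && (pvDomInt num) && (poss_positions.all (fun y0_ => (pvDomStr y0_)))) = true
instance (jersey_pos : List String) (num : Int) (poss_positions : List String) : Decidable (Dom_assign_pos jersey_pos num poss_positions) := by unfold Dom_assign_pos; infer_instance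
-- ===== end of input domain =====

-- B replaces A's counter loop by a set of allowed positions plus a count-down on num that repeatedly strips the prefix through the first allowed element (objective: alternative).


-- ===== PORT A =====
-- the 'for item in jersey_pos' loop with its counter and early return
def assignPosLoopA (poss_positions : List String) : List String → Int → Int → String
  | [], _, _ => "--"
  | item :: rest, counter, num =>
    if poss_positions.contains item then
      if counter + 1 == num then item
      else assignPosLoopA poss_positions rest (counter + 1) num
    else assignPosLoopA poss_positions rest counter num

def assign_pos (jersey_pos : List String) (num : Int) (poss_positions : List String) : String :=
  assignPosLoopA poss_positions jersey_pos 0 num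

-- ===== PORT B =====
-- _find_first: first element of lst in allowed, paired with the remainder after it
-- (the pair (lst[j], lst[j+1:]) is built structurally instead of via the index j — exact).
def pyFindFirst (allowed : PySem.Set String) : List String → Option (String × List String)
  | [] => none
  | x :: xs => if PySem.Set.contains allowed x then some (x, xs) else pyFindFirst allowed xs

theorem pyFindFirst_shrinks (allowed : PySem.Set String) :
    ∀ (lst : List String) (item : String) (rest : List String),
      pyFindFirst allowed lst = some (item, rest) → rest.length < lst.length := by
  intro lst
  induction lst with
  | nil => intro _ _ h; simp [pyFindFirst] at h
  | cons x xs ih =>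
    intro item rest h
    rw [pyFindFirst] at h
    split at h
    · cases h; simp
    · exact Nat.lt_trans (ih _ _ h) (by simp)

-- the 'while k >= 1' loop of B
def assignPosLoopB (allowed : PySem.Set String) (lst : List String) (k : Int) : String :=
  if k ≥ 1 then
    match h : pyFindFirst allowed lst with
    | none => "--"
    | some (item, rest) => if k == 1 then item else assignPosLoopB allowed rest (k - 1)
  else "--"
termination_by lst.length
decreasing_by exact pyFindFirst_shrinks allowed lst _ _ h

def assign_pos_alt (jersey_pos : List String) (num : Int) (poss_positions : List String) : String :=
  assignPosLoopB (PySem.Set.ofList poss_positions) jersey_pos num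

-- ===== PRECONDITION & SPEC =====
def Spec_assign_pos (jersey_pos : List String) (num : Int) (poss_positions : List String) (out : String) : Prop := out = assign_pos_alt jersey_pos num poss_positions
instance (jersey_pos : List String) (num : Int) (poss_positions : List String) (out : String) : Decidable (Spec_assign_pos jersey_pos num poss_positions out) := by unfold Spec_assign_pos; infer_instance

-- ===== CLAIM =====
def Claim_equal_assign_pos : Prop := ∀ (jersey_pos : List String) (num : Int) (poss_positions : List String), Dom_assign_pos jersey_pos num poss_positions → Spec_assign_pos jersey_pos num poss_positions (assign_pos jersey_pos num poss_positions)

-- ===== LEMMAS AND PROOFS =====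

-- membership in the built set agrees with A's 'item in poss_positions'
theorem contains_ofList (poss : List String) (x : String) :
    PySem.Set.contains (PySem.Set.ofList poss) x = poss.contains x := by
  simp [PySem.Set.contains_eq_listContains, List.contains_eq_mem, PySem.Set.mem_ofList]

-- pyFindFirst decomposes the filtered list
theorem pyFindFirst_filter (allowed : PySem.Set String) (lst : List String) :
    (pyFindFirst allowed lst = none → lst.filter allowed.contains = []) ∧
    (∀ item rest, pyFindFirst allowed lst = some (item, rest) →
        lst.filter allowed.contains = item :: rest.filter allowed.contains) := by
  induction lst with
  | nil => simp [pyFindFirst]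
  | cons x xs ih =>
    by_cases hx : PySem.Set.contains allowed x = true
    · constructor
      · intro h; rw [pyFindFirst, if_pos hx] at h; cases h
      · intro item rest h
        rw [pyFindFirst, if_pos hx] at h
        cases h
        rw [List.filter_cons_of_pos hx]
    · constructor
      · intro h
        rw [pyFindFirst, if_neg hx] at h
        rw [List.filter_cons_of_neg hx]
        exact ih.1 h
      · intro item rest h
        rw [pyFindFirst, if_neg hx] at h
        rw [List.filter_cons_of_neg hx]
        exact ih.2 item rest h

-- B's loop selects element (k-1) of the filtered list, with the bounds guard
theorem assignPosLoopB_eq (allowed : PySem.Set String) :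
    ∀ (n : Nat) (lst : List String), lst.length ≤ n → ∀ (k : Int),
      assignPosLoopB allowed lst k =
        (if 1 ≤ k ∧ k ≤ ((lst.filter allowed.contains).length : Int)
         then (lst.filter allowed.contains).getD (k - 1).toNat "--"
         else "--") := by
  intro n
  induction n with
  | zero =>
    intro lst hlen k
    have : lst = [] := List.eq_nil_of_length_eq_zero (Nat.le_zero.mp hlen)
    subst this
    rw [assignPosLoopB]
    simp [pyFindFirst]
  | succ m ih =>
    intro lst hlen k
    rw [assignPosLoopB]
    by_cases hk : k ≥ 1
    · rw [if_pos hk]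
      split
      case _ hf =>
        rw [(pyFindFirst_filter allowed lst).1 hf]
        simp only [List.length_nil, Nat.cast_zero]
        rw [if_neg (by omega)]
      case _ item rest hf =>
        have hfil := (pyFindFirst_filter allowed lst).2 item rest hf
        rw [hfil]
        by_cases h1 : k = 1
        · subst h1
          have hc : (1:Int) ≤ 1 ∧ (1:Int) ≤ (((item :: rest.filter allowed.contains)).length : Int) := by
            refine ⟨le_refl 1, ?_⟩
            simp only [List.length_cons]
            push_cast
            omega
          rw [if_pos (by simp), if_pos hc]
          norm_num
        · rw [if_neg (by simpa using h1)]
          have hr : rest.length ≤ m :=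
            Nat.lt_succ_iff.mp (Nat.lt_of_lt_of_le (pyFindFirst_shrinks allowed lst item rest hf) hlen)
          rw [ih rest hr (k - 1)]
          by_cases hin : 1 ≤ k - 1 ∧ k - 1 ≤ ((rest.filter allowed.contains).length : Int)
          · rw [if_pos hin, if_pos (by simp only [List.length_cons]; push_cast; omega)]
            have : (k - 1).toNat = (k - 1 - 1).toNat + 1 := by omega
            rw [this, List.getD_cons_succ]
          · rw [if_neg hin, if_neg (by simp only [List.length_cons]; push_cast at hin ⊢; omega)]
    · rw [if_neg hk, if_neg (by omega)]

-- A's loop started at counter c selects element (num - c - 1) of the filtered list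
theorem assignPosLoopA_eq (poss_positions : List String) (l : List String) (c num : Int) :
    assignPosLoopA poss_positions l c num =
      (if c + 1 ≤ num ∧ num ≤ c + ((l.filter poss_positions.contains).length : Int)
       then (l.filter poss_positions.contains).getD (num - c - 1).toNat "--"
       else "--") := by
  induction l generalizing c with
  | nil =>
    rw [assignPosLoopA, List.filter_nil]
    rw [if_neg (by simp)]
  | cons x xs ih =>
    rw [assignPosLoopA]
    by_cases hx : poss_positions.contains x = true
    · rw [if_pos hx, List.filter_cons_of_pos hx]
      by_cases heq : c + 1 = num
      · rw [if_pos (show (c + 1 == num) = true by simpa using heq)]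
        rw [if_pos (by simp only [List.length_cons]; push_cast; omega)]
        have h0 : (num - c - 1).toNat = 0 := by omega
        rw [h0, List.getD_cons_zero]
      · rw [if_neg (show ¬ (c + 1 == num) = true by simpa using heq), ih]
        by_cases hin : c + 1 + 1 ≤ num ∧
            num ≤ c + 1 + ((xs.filter poss_positions.contains).length : Int)
        · rw [if_pos hin, if_pos (by simp only [List.length_cons]; push_cast; omega)]
          have h1 : (num - c - 1).toNat = (num - (c + 1) - 1).toNat + 1 := by omega
          rw [h1, List.getD_cons_succ]
        · rw [if_neg hin, if_neg (by simp only [List.length_cons]; push_cast at hin ⊢; omega)]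
    · rw [if_neg hx, List.filter_cons_of_neg hx, ih]

-- ===== VERDICT =====
theorem assign_pos_spec : Claim_equal_assign_pos := by
  intro jersey_pos num poss_positions _
  show assign_pos jersey_pos num poss_positions = assign_pos_alt jersey_pos num poss_positions
  rw [assign_pos, assign_pos_alt, assignPosLoopA_eq,
      assignPosLoopB_eq (PySem.Set.ofList poss_positions) jersey_pos.length jersey_pos le_rfl]
  have hfil : jersey_pos.filter (PySem.Set.ofList poss_positions).contains
      = jersey_pos.filter poss_positions.contains := by
    apply List.filter_congr
    intro x _
    exact contains_ofList poss_positions x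
  rw [hfil]
  simp only [zero_add, sub_zero]
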